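-- pv_equiv track=rewrite | github.com/sumeyye-agac/awesome-efficient-har | scripts/generate_readme.py | select_link
-- ===== SOURCE A (Python) =====
-- def select_link(links: dict) -> tuple[str | None, str | None]:
--     if not isinstance(links, dict) or not links:
--         return None, None
--
--     priority = [
--         "official",
--         "paper",
--         "dataset",
--         "code",
--         "docs",
--         "benchmark",
--         "leaderboard",
--         "template",
--         "placeholder",
--     ]
--     for key in priority:
--         if key in links:
--             return key, links[key]
--
--     first_key = sorted(links.keys())[0]
--     return first_key, links[first_key]
-- ===== SOURCE B (Python) =====
-- def select_link(links: dict) -> tuple[str | None, str | None]: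
--     if not isinstance(links, dict) or not links:
--         return None, None
--
--     priority = [
--         "official",
--         "paper",
--         "dataset",
--         "code",
--         "docs",
--         "benchmark",
--         "leaderboard",
--         "template",
--         "placeholder",
--     ]
--     rank = {name: index for index, name in enumerate(priority)}
--     best = min(links, key=lambda k: (rank.get(k, len(priority)), k))
--     return best, links[best]
-- ===== Notes on version B (the rewrite author's own statement) =====
-- stated objective: alternative
-- what changed: Replaces the explicit priority-scan loop plus the sorted-keys-first fallback with a single min pass over the dict keys using a composite (rank, key) ordering built from an enumerate-based rank dict.
import Mathlib
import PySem

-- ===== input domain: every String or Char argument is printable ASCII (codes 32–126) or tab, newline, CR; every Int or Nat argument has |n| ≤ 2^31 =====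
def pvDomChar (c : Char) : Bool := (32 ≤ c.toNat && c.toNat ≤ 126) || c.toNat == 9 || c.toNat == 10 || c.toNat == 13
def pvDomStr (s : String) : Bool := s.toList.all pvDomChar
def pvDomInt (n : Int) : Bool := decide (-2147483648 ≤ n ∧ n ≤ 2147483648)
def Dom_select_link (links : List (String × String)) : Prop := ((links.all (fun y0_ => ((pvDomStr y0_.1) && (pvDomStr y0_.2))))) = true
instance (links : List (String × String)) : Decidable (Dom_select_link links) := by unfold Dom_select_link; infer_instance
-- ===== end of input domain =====

-- B replaces A's explicit priority-scan loop plus sorted-keys-first fallback by one min pass over the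
-- keys under the composite key (rank.get(k, len(priority)), k) with rank built by enumerate
-- (objective: alternative decomposition; same observable behaviour, return value only).

-- ===== PORT A =====
-- the module-level priority list (shared constant of both versions)
def pvPriority : List String :=
  ["official", "paper", "dataset", "code", "docs", "benchmark", "leaderboard", "template", "placeholder"]

-- 'for key in priority: if key in links: return key, links[key]' (early return = recursion result some _)
def pvScan (d : PySem.Dict String String) : List String → Option (Option String × Option String)
  | [] => none
  | k :: rest => if d.contains k then some (some k, d.get? k) else pvScan d rest

def select_link (links : List (String × String)) : Option String × Option String :=
  if links = [] then (none, none)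
  else
    let d : PySem.Dict String String := PySem.Dict.mk links
    match pvScan d pvPriority with
    | some r => r
    | none =>
      let first_key := (PySem.List.sorted d.keys (fun x => x) false).getD 0 ""
      (some first_key, d.get? first_key)

-- ===== PORT B =====
-- rank = {name: index for index, name in enumerate(priority)}
def pvRank : PySem.Dict String Int :=
  (PySem.List.enumerate pvPriority 0).foldl (fun acc p => acc.insert p.2 p.1) PySem.Dict.empty

def select_link_alt (links : List (String × String)) : Option String × Option String :=
  if links = [] then (none, none)
  else
    let d : PySem.Dict String String := PySem.Dict.mk links
    -- best = min(links, key=lambda k: (rank.get(k, len(priority)), k))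
    match PySem.List.min2? d.keys (fun k => pvRank.getD k (pvPriority.length : Int)) (fun k => k) with
    | some best => (some best, d.get? best)
    | none => (none, none)   -- not reached when the guard has passed

-- ===== PRECONDITION & SPEC =====
def Spec_select_link (links : List (String × String)) (out : Option String × Option String) : Prop := out = select_link_alt links
instance (links : List (String × String)) (out : Option String × Option String) : Decidable (Spec_select_link links out) := by unfold Spec_select_link; infer_instance

-- ===== CLAIM (what is proved, stated in full; the proofs are below) =====
def Claim_equal_select_link : Prop := ∀ (links : List (String × String)), Dom_select_link links → Spec_select_link links (select_link links)

-- ===== LEMMAS AND PROOFS =====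

-- B's composite comparison key, as one lexicographic value
def pvKey (k : String) : Lex (Int × String) := toLex (pvRank.getD k (pvPriority.length : Int), k)

-- the rank dict looked up with default 9 is exactly idxOf into the priority list
set_option maxRecDepth 8192 in
set_option maxHeartbeats 1000000 in
theorem pvRank_getD (k : String) : pvRank.getD k (pvPriority.length : Int) = (pvPriority.idxOf k : Int) := by
  simp only [pvRank, pvPriority, PySem.List.enumerate, List.foldl, PySem.Dict.getD_insert,
    PySem.Dict.getD_empty, List.length]
  simp only [List.idxOf_cons, List.idxOf_nil, Bool.cond_eq_ite, beq_iff_eq, @eq_comm String k]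
  split_ifs <;> subst_vars <;> simp_all

-- min2? with identity second key is min? under the lexicographic key
theorem pv_min2_eq (xs : List String) (k1 : String → Int) :
    PySem.List.min2? xs k1 (fun x => x) = PySem.List.min? xs (fun x => toLex (k1 x, x)) := by
  unfold PySem.List.min2? PySem.List.min?
  congr 1
  funext acc x
  cases acc with
  | none => rfl
  | some m =>
    have hb : (decide (k1 x < k1 m) || (!decide (k1 m < k1 x) && decide (x < m)))
        = decide (toLex (k1 x, x) < toLex (k1 m, m)) := by
      rw [Bool.eq_iff_iff]
      simp only [Bool.or_eq_true, Bool.and_eq_true, Bool.not_eq_true', decide_eq_true_eq,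
        decide_eq_false_iff_not, not_lt, Prod.Lex.lt_iff, ofLex_toLex]
      constructor
      · rintro (h | ⟨h1, h2⟩)
        · exact Or.inl h
        · rcases lt_or_eq_of_le h1 with h' | h'
          · exact Or.inl h'
          · exact Or.inr ⟨by omega, h2⟩
      · rintro (h | ⟨h1, h2⟩)
        · exact Or.inl h
        · exact Or.inr ⟨by omega, h2⟩
    show (if (decide (k1 x < k1 m) || (!decide (k1 m < k1 x) && decide (x < m))) = true
        then some x else some m)
      = (if toLex (k1 x, x) < toLex (k1 m, m) then some x else some m)
    rw [hb]
    simp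

-- the scan found nothing: no priority key is in the dict
theorem pvScan_none (d : PySem.Dict String String) (ps : List String) (h : pvScan d ps = none) :
    ∀ p ∈ ps, d.contains p = false := by
  induction ps with
  | nil => intro p hp; cases hp
  | cons k rest ih =>
    intro p hp
    unfold pvScan at h
    by_cases hc : d.contains k
    · simp [hc] at h
    · rcases List.mem_cons.mp hp with rfl | hp'
      · simpa using hc
      · exact ih (by simpa [hc] using h) p hp'

-- the scan returned: its result is the FIRST priority key present, paired with its lookup
theorem pvScan_some (d : PySem.Dict String String) (ps : List String)
    (r : Option String × Option String) (h : pvScan d ps = some r) :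
    ∃ i, ∃ hi : i < ps.length, r = (some ps[i], d.get? ps[i]) ∧ d.contains ps[i] = true ∧
      ∀ j, (hj : j < ps.length) → j < i → d.contains ps[j] = false := by
  induction ps with
  | nil => simp [pvScan] at h
  | cons k rest ih =>
    unfold pvScan at h
    by_cases hc : d.contains k
    · refine ⟨0, by simp, ?_, by simpa using hc, by omega⟩
      simp [hc] at h
      simpa using h.symm
    · obtain ⟨i, hi, hr, hck, hfirst⟩ := ih (by simpa [hc] using h)
      refine ⟨i + 1, by simpa using Nat.succ_lt_succ hi, by simpa using hr, by simpa using hck, ?_⟩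
      intro j hj hji
      cases j with
      | zero => simpa using hc
      | succ j' => exact hfirst j' (by simpa using Nat.lt_of_succ_lt_succ hj) (by omega)

-- A's chosen key is a pvKey-lower bound over the dict keys; B's is too; pvKey is injective,
-- so the two keys coincide.
theorem pvKey_inj {a b : String} (h : pvKey a = pvKey b) : a = b := by
  unfold pvKey at h
  have := congrArg (fun x => (ofLex x).2) h
  simpa using this

theorem pv_unique {ks : List String} {a b : String}
    (ha : a ∈ ks) (hb : b ∈ ks)
    (hamin : ∀ y ∈ ks, pvKey a ≤ pvKey y) (hbmin : ∀ y ∈ ks, pvKey b ≤ pvKey y) : a = b :=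
  pvKey_inj (le_antisymm (hamin b hb) (hbmin a ha))

-- a key of the dict that the scan's outcome dominates
theorem pv_lt_key {y k : String}
    (h : toLex ((pvPriority.idxOf y : Int), y) < toLex ((pvPriority.idxOf k : Int), k)) :
    pvPriority.idxOf y < pvPriority.idxOf k ∨ (pvPriority.idxOf y = pvPriority.idxOf k ∧ y < k) := by
  have h0 := Prod.Lex.lt_iff.mp h
  simp only [ofLex_toLex] at h0
  rcases h0 with h' | ⟨h1, h2⟩
  · exact Or.inl (by exact_mod_cast h')
  · exact Or.inr ⟨by exact_mod_cast h1, h2⟩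

-- ===== VERDICT (by name: the statement is the Claim_ definition above) =====
theorem select_link_spec : Claim_equal_select_link := by
  intro links _
  unfold Spec_select_link select_link select_link_alt
  by_cases hnil : links = []
  · simp [hnil]
  · simp only [if_neg hnil]
    have hkeys : (PySem.Dict.mk links).keys ≠ [] := by
      simp only [PySem.Dict.keys_mk]
      exact fun h => hnil (List.map_eq_nil_iff.mp h)
    -- B's side: rewrite min2? into min? under pvKey
    have hk1 : (fun k => pvRank.getD k (pvPriority.length : Int)) = fun k => (pvPriority.idxOf k : Int) := by
      funext k; exact pvRank_getD k
    rw [pv_min2_eq]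
    rcases hmin : PySem.List.min? (PySem.Dict.mk links).keys
        (fun x => toLex ((fun k => pvRank.getD k (pvPriority.length : Int)) x, x)) with _ | mB
    · exact absurd (PySem.List.min?_eq_none_iff _ _ |>.mp hmin) hkeys
    · have hmB_mem : mB ∈ (PySem.Dict.mk links).keys := PySem.List.min?_mem hmin
      have hmB_min : ∀ y ∈ (PySem.Dict.mk links).keys, pvKey mB ≤ pvKey y := by
        intro y hy
        have := PySem.List.min?_isMin hmin y hy
        simpa [pvKey] using this
      -- A's side
      rcases hscan : pvScan (PySem.Dict.mk links) pvPriority with _ | r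
      · -- no priority key present: A takes the head of the sorted keys
        have hnone := pvScan_none _ _ hscan
        rcases hsorted : PySem.List.sorted (PySem.Dict.mk links).keys (fun x => x) false with _ | ⟨m, t⟩
        · exact absurd ((PySem.List.sorted_eq_nil_iff _ _ _).mp hsorted) hkeys
        · simp only [List.getD_cons_zero]
          have hm_mem : m ∈ (PySem.Dict.mk links).keys := by
            rw [← PySem.List.mem_sorted _ (fun x => x) false, hsorted]; exact List.mem_cons_self
          -- every dict key is outside the priority list, so its rank is 9
          have hrank9 : ∀ y ∈ (PySem.Dict.mk links).keys, pvPriority.idxOf y = pvPriority.length := by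
            intro y hy
            refine List.idxOf_eq_length (fun hymem => ?_)
            have := (PySem.Dict.contains_iff_mem_keys (PySem.Dict.mk links) y).mpr hy
            rw [hnone y hymem] at this; cases this
          have hm_min : ∀ y ∈ (PySem.Dict.mk links).keys, pvKey m ≤ pvKey y := by
            intro y hy
            rw [← not_lt]
            intro hlt
            simp only [pvKey, pvRank_getD] at hlt
            rcases pv_lt_key hlt with h' | ⟨_, h2⟩
            · rw [hrank9 y hy, hrank9 m hm_mem] at h'; omega
            · exact absurd h2 (not_lt.mpr (PySem.List.key_head_sorted_le _ _ hsorted y hy))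
          have : m = mB := pv_unique hm_mem hmB_mem hm_min hmB_min
          rw [this]
      · -- the scan hit: its key is the first priority key present
        obtain ⟨i, hi, hr, hck, hfirst⟩ := pvScan_some _ _ _ hscan
        have hk_mem : pvPriority[i] ∈ (PySem.Dict.mk links).keys :=
          (PySem.Dict.contains_iff_mem_keys _ _).mp hck
        have hidx : pvPriority.idxOf pvPriority[i] = i :=
          List.Nodup.idxOf_getElem (by decide) i hi
        have hk_min : ∀ y ∈ (PySem.Dict.mk links).keys, pvKey pvPriority[i] ≤ pvKey y := by
          intro y hy
          rw [← not_lt]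
          intro hlt
          simp only [pvKey, pvRank_getD] at hlt
          rcases pv_lt_key hlt with h' | ⟨h1, h2⟩
          · -- y would be an earlier priority key that is present
            rw [hidx] at h'
            have hylt : pvPriority.idxOf y < pvPriority.length := by
              have := List.idxOf_le_length (l := pvPriority) (a := y); omega
            have hymem : y ∈ pvPriority := List.idxOf_lt_length_iff.mp hylt
            have hgety : pvPriority[pvPriority.idxOf y]'hylt = y :=
              List.getElem_idxOf hylt
            have := hfirst (pvPriority.idxOf y) hylt h'
            rw [hgety] at this
            rw [(PySem.Dict.contains_iff_mem_keys _ _).mpr hy] at this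
            cases this
          · -- equal rank below 9 forces the same string
            rw [hidx] at h1
            have hylt : pvPriority.idxOf y < pvPriority.length := by omega
            have : y = pvPriority[i] := by
              have hgety : pvPriority[pvPriority.idxOf y]'hylt = y := List.getElem_idxOf hylt
              simp only [show pvPriority.idxOf y = i from by omega] at hgety
              exact hgety.symm
            rw [this] at h2; exact lt_irrefl _ h2
        have : pvPriority[i] = mB := pv_unique hk_mem hmB_mem hk_min hmB_min
        rw [hr]
        rw [this]
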